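-- pv_equiv track=rewrite | github.com/Ranjitsinha19/Equip9- | Optimal_2.py | match_requests
-- ===== SOURCE A (Python) =====
-- import heapq
-- from collections import defaultdict
--
-- def match_requests(requests, sellers):
--     # Step 1: Organize sellers into a dictionary of min-heaps
--     seller_dict = defaultdict(list)
--
--     for eq_type, price in sellers:
--         heapq.heappush(seller_dict[eq_type], price)
--
--     # Step 2: Process buyer requests
--     result = []
--     for eq_type, max_price in requests:
--         if eq_type in seller_dict:
--             while seller_dict[eq_type] and seller_dict[eq_type][0] > max_price:
--                 heapq.heappop(seller_dict[eq_type])  # Remove overpriced items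
--
--             if seller_dict[eq_type]:
--                 result.append(heapq.heappop(seller_dict[eq_type]))  # Get the lowest valid price
--             else:
--                 result.append(None)
--         else:
--             result.append(None)
--
--     return result
-- ===== SOURCE B (Python) =====
-- def match_requests(requests, sellers):
--     # Group seller prices per type, sort each group once, and consume with a pointer.
--     groups = {}
--     for t, p in sellers:
--         groups.setdefault(t, []).append(p)
--     for t in groups:
--         groups[t].sort()
--     ptr = {}
--     result = []
--     for t, mx in requests:
--         if t not in groups:
--             result.append(None)
--             continue
--         lst = groups[t]
--         i = ptr.get(t, 0)
--         if i < len(lst) and lst[i] <= mx: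
--             result.append(lst[i])
--             ptr[t] = i + 1
--         else:
--             result.append(None)
--             ptr[t] = len(lst)
--     return result
-- ===== Notes on version B (the rewrite author's own statement) =====
-- stated objective: simpler
-- what changed: Replaces the per-request heap drain (heappush/heappop with an inner while loop) by grouping seller prices into per-type lists sorted once, consumed by a per-type pointer that jumps to the end when the cheapest remaining price is unaffordable.
import Mathlib
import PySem

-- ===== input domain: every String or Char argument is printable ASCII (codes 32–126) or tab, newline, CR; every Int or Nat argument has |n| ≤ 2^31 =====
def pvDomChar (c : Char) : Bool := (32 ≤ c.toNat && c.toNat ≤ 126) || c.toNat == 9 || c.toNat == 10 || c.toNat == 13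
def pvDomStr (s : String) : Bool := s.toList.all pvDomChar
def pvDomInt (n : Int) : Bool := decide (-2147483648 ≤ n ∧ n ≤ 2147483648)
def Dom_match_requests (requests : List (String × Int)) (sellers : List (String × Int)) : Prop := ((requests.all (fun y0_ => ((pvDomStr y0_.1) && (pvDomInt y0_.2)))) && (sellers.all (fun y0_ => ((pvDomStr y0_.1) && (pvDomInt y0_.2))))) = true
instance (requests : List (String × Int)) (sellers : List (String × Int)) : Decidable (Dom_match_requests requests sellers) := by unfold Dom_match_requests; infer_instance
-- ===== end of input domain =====

-- B replaces A's per-request heap drain by per-type lists sorted once and consumed via a pointer (simpler; same results).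


-- ===== PORT A =====
-- heapq on a list of Ints: modelled as a sorted list — heappush inserts in order, the heap top is
-- the head, heappop removes the head; the observable min-pop behaviour is exactly Python's heapq.
def heapPush (h : List Int) (p : Int) : List Int :=
  PySem.List.insertBy (fun a b => decide (a < b)) p h

-- 'while seller_dict[t] and seller_dict[t][0] > max_price: heappop(seller_dict[t])'
def heapDrain (mx : Int) : List Int → List Int
  | [] => []
  | h :: t => if mx < h then heapDrain mx t else h :: t

def stepA (st : PySem.Dict String (List Int) × List (Option Int)) (req : String × Int) :
    PySem.Dict String (List Int) × List (Option Int) :=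
  let (d, res) := st
  if d.contains req.1 then
    match heapDrain req.2 (d.getD req.1 []) with
    | [] => (d.insert req.1 [], res ++ [none])
    | h :: rest => (d.insert req.1 rest, res ++ [some h])
  else (d, res ++ [none])

def match_requests (requests : List (String × Int)) (sellers : List (String × Int)) : List (Option Int) :=
  let sellerDict := sellers.foldl (fun d p => d.modify p.1 [] (fun h => heapPush h p.2)) PySem.Dict.empty
  (requests.foldl stepA (sellerDict, [])).2

-- ===== PORT B =====
def stepB (groups : PySem.Dict String (List Int))
    (st : PySem.Dict String Int × List (Option Int)) (req : String × Int) :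
    PySem.Dict String Int × List (Option Int) :=
  let (ptr, res) := st
  match groups.get? req.1 with
  | none => (ptr, res ++ [none])
  | some lst =>
    let i := ptr.getD req.1 0
    if i < (lst.length : Int) then
      match PySem.List.pyGet? lst i with
      | some v =>
        if v ≤ req.2 then (ptr.insert req.1 (i + 1), res ++ [some v])
        else (ptr.insert req.1 (lst.length : Int), res ++ [none])
      | none => (ptr.insert req.1 (lst.length : Int), res ++ [none])  -- unreachable: 0 ≤ i < len
    else (ptr.insert req.1 (lst.length : Int), res ++ [none])

def match_requests_alt (requests : List (String × Int)) (sellers : List (String × Int)) : List (Option Int) :=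
  let groups0 := sellers.foldl (fun d p => d.modify p.1 [] (fun h => h ++ [p.2])) PySem.Dict.empty
  let groups := PySem.Dict.mk (groups0.items.map (fun kv => (kv.1, PySem.List.sorted kv.2 (fun x => x) false)))
  (requests.foldl (stepB groups) (PySem.Dict.empty, [])).2

-- ===== PRECONDITION & SPEC =====
def Spec_match_requests (requests : List (String × Int)) (sellers : List (String × Int)) (out : List (Option Int)) : Prop := out = match_requests_alt requests sellers
instance (requests : List (String × Int)) (sellers : List (String × Int)) (out : List (Option Int)) : Decidable (Spec_match_requests requests sellers out) := by unfold Spec_match_requests; infer_instance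

-- ===== CLAIM (what is proved, stated in full; the proofs are below) =====
def Claim_equal_match_requests : Prop := ∀ (requests : List (String × Int)) (sellers : List (String × Int)), Dom_match_requests requests sellers → Spec_match_requests requests sellers (match_requests requests sellers)

-- ===== LEMMAS AND PROOFS =====

-- the loop invariant relating A's mutated heap dict to B's fixed groups + pointer dict
def HInv (g dA : PySem.Dict String (List Int)) (ptr : PySem.Dict String Int) : Prop :=
  ∀ k, dA.contains k = g.contains k ∧ 0 ≤ ptr.getD k 0 ∧
    dA.getD k [] = (g.getD k []).drop (ptr.getD k 0).toNat

theorem heapDrain_eq_nil {mx : Int} {l : List Int} (h : ∀ x ∈ l, mx < x) : heapDrain mx l = [] := by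
  induction l with
  | nil => rfl
  | cons a t ih =>
    simp only [heapDrain, if_pos (h a (by simp))]
    exact ih (fun x hx => h x (by simp [hx]))

theorem step_eq {g dA : PySem.Dict String (List Int)} {ptr : PySem.Dict String Int}
    {res : List (Option Int)}
    (hs : ∀ k, ((g.getD k [] : List Int)).Pairwise (· ≤ ·))
    (hI : HInv g dA ptr) (req : String × Int) :
    (stepA (dA, res) req).2 = (stepB g (ptr, res) req).2 ∧
    HInv g (stepA (dA, res) req).1 (stepB g (ptr, res) req).1 := by
  obtain ⟨t, mx⟩ := req
  obtain ⟨hc, hge, hdrop⟩ := hI t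
  cases hg : g.get? t with
  | none =>
    have hgc : g.contains t = false := by rw [PySem.Dict.contains_eq_isSome_get?, hg]; rfl
    have hac : dA.contains t = false := by rw [hc, hgc]
    refine ⟨by simp [stepA, stepB, hg, hac], ?_⟩
    simpa [stepA, stepB, hg, hac] using hI
  | some lst =>
    have hgd : g.getD t [] = lst := by rw [PySem.Dict.getD_eq_get?_getD, hg]; rfl
    have hgc : g.contains t = true := by rw [PySem.Dict.contains_eq_isSome_get?, hg]; rfl
    have hac : dA.contains t = true := by rw [hc, hgc]
    have hsort : lst.Pairwise (· ≤ ·) := hgd ▸ hs t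
    have hdA : dA.getD t [] = lst.drop (ptr.getD t 0).toNat := by rw [hdrop, hgd]
    have hupd : ∀ (l : List Int) (j : Int), 0 ≤ j → l = lst.drop j.toNat →
        HInv g (dA.insert t l) (ptr.insert t j) := by
      intro l j hj hl k
      by_cases hk : k = t
      · subst hk
        refine ⟨?_, ?_, ?_⟩
        · rw [PySem.Dict.contains_insert]; simp [hgc]
        · rw [PySem.Dict.getD_insert_self]; exact hj
        · rw [PySem.Dict.getD_insert_self, PySem.Dict.getD_insert_self, hl, hgd]
      · obtain ⟨h1, h2, h3⟩ := hI k
        refine ⟨?_, ?_, ?_⟩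
        · rw [PySem.Dict.contains_insert, h1]
          simp [hk]
        · rw [PySem.Dict.getD_insert, if_neg hk]; exact h2
        · rw [PySem.Dict.getD_insert, if_neg hk, PySem.Dict.getD_insert, if_neg hk]; exact h3
    by_cases hlt : ptr.getD t 0 < (lst.length : Int)
    · have hnat : (ptr.getD t 0).toNat < lst.length := by omega
      have hget : PySem.List.pyGet? lst (ptr.getD t 0) = some lst[(ptr.getD t 0).toNat] := by
        rw [PySem.List.pyGet?_of_nonneg lst hge]
        simp [List.getElem?_eq_getElem hnat]
      have hdropeq : lst.drop (ptr.getD t 0).toNat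
          = lst[(ptr.getD t 0).toNat] :: lst.drop ((ptr.getD t 0).toNat + 1) :=
        List.drop_eq_getElem_cons hnat
      by_cases hv : lst[(ptr.getD t 0).toNat] ≤ mx
      · have hdrain : heapDrain mx (lst.drop (ptr.getD t 0).toNat)
            = lst[(ptr.getD t 0).toNat] :: lst.drop ((ptr.getD t 0).toNat + 1) := by
          rw [hdropeq, heapDrain, if_neg (by omega)]
        have hA : stepA (dA, res) (t, mx)
            = (dA.insert t (lst.drop ((ptr.getD t 0).toNat + 1)), res ++ [some lst[(ptr.getD t 0).toNat]]) := by
          simp only [stepA, hac, if_true, hdA, hdrain]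
        have hB : stepB g (ptr, res) (t, mx)
            = (ptr.insert t (ptr.getD t 0 + 1), res ++ [some lst[(ptr.getD t 0).toNat]]) := by
          simp only [stepB, hg, hget, if_pos hlt, if_pos hv]
        rw [hA, hB]
        refine ⟨rfl, hupd _ _ (by omega) ?_⟩
        congr 1
        omega
      · have hrem : (lst.drop (ptr.getD t 0).toNat).Pairwise (· ≤ ·) :=
          hsort.sublist (List.drop_sublist _ _)
        have hall : ∀ x ∈ lst.drop (ptr.getD t 0).toNat, mx < x := by
          intro x hx
          rw [hdropeq] at hx hrem
          rcases List.mem_cons.mp hx with h | h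
          · omega
          · have := (List.pairwise_cons.mp hrem).1 x h
            omega
        have hdrain : heapDrain mx (lst.drop (ptr.getD t 0).toNat) = [] :=
          heapDrain_eq_nil hall
        have hA : stepA (dA, res) (t, mx) = (dA.insert t [], res ++ [none]) := by
          simp only [stepA, hac, if_true, hdA, hdrain]
        have hB : stepB g (ptr, res) (t, mx)
            = (ptr.insert t (lst.length : Int), res ++ [none]) := by
          simp only [stepB, hg, hget, if_pos hlt, if_neg hv]
        rw [hA, hB]
        exact ⟨rfl, hupd _ _ (by omega) (by simp)⟩
    · have hnil : lst.drop (ptr.getD t 0).toNat = [] :=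
        List.drop_eq_nil_iff.mpr (by omega)
      have hdrain : heapDrain mx (lst.drop (ptr.getD t 0).toNat) = [] := by
        rw [hnil]; rfl
      have hA : stepA (dA, res) (t, mx) = (dA.insert t [], res ++ [none]) := by
        simp only [stepA, hac, if_true, hdA, hdrain]
      have hB : stepB g (ptr, res) (t, mx)
          = (ptr.insert t (lst.length : Int), res ++ [none]) := by
        simp only [stepB, hg, if_neg hlt]
      rw [hA, hB]
      exact ⟨rfl, hupd _ _ (by omega) (by simp)⟩

theorem fold_eq {g : PySem.Dict String (List Int)} (hs : ∀ k, ((g.getD k [] : List Int)).Pairwise (· ≤ ·)) :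
    ∀ (requests : List (String × Int)) dA ptr res, HInv g dA ptr →
    (requests.foldl stepA (dA, res)).2 = (requests.foldl (stepB g) (ptr, res)).2 := by
  intro requests
  induction requests with
  | nil => intro dA ptr res _; rfl
  | cons r t ih =>
    intro dA ptr res hI
    obtain ⟨h1, h2⟩ := step_eq hs hI r
    simp only [List.foldl]
    have hA : stepA (dA, res) r = ((stepA (dA, res) r).1, (stepA (dA, res) r).2) := rfl
    have hB : stepB g (ptr, res) r = ((stepB g (ptr, res) r).1, (stepB g (ptr, res) r).2) := rfl
    rw [hA, hB, h1]
    exact ih _ _ _ h2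

-- initial-state lemmas
theorem getD_foldl_heapPush (l : List (String × Int)) (d : PySem.Dict String (List Int)) (c : String) :
    (l.foldl (fun d p => d.modify p.1 [] (fun h => heapPush h p.2)) d).getD c []
      = ((l.filter (fun p => p.1 == c)).map (·.2)).foldl heapPush (d.getD c []) := by
  induction l generalizing d with
  | nil => rfl
  | cons p t ih =>
    simp only [List.foldl, List.filter_cons]
    rw [ih, PySem.Dict.getD_modify]
    by_cases h : p.1 = c
    · subst h
      simp
    · rw [if_neg (fun hc => h hc.symm)]
      simp [h]

theorem get?_mapValues {ν ν' : Type} (f : ν → ν') (items : List (String × ν)) (k : String) :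
    (PySem.Dict.mk (items.map (fun kv => (kv.1, f kv.2)))).get? k
      = ((PySem.Dict.mk items).get? k).map f := by
  induction items with
  | nil => rfl
  | cons p t ih =>
    obtain ⟨a, b⟩ := p
    simp only [List.map, PySem.Dict.get?_mk_cons]
    by_cases h : a == k
    · simp [h]
    · simp [h, ih]

theorem init_inv (sellers : List (String × Int)) :
    (∀ k, (((PySem.Dict.mk (((sellers.foldl (fun d p => d.modify p.1 [] (fun h => h ++ [p.2])) PySem.Dict.empty).items).map (fun kv => (kv.1, PySem.List.sorted kv.2 (fun x => x) false)))).getD k [] : List Int)).Pairwise (· ≤ ·)) ∧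
    HInv (PySem.Dict.mk (((sellers.foldl (fun d p => d.modify p.1 [] (fun h => h ++ [p.2])) PySem.Dict.empty).items).map (fun kv => (kv.1, PySem.List.sorted kv.2 (fun x => x) false))))
        (sellers.foldl (fun d p => d.modify p.1 [] (fun h => heapPush h p.2)) PySem.Dict.empty)
        PySem.Dict.empty := by
  have hF : ∀ k, ((sellers.foldl (fun d p => d.modify p.1 [] (fun h => h ++ [p.2])) PySem.Dict.empty).getD k [] : List Int)
      = (sellers.filter (fun p => p.1 == k)).map (·.2) := by
    intro k
    rw [PySem.Dict.getD_foldl_modify_append]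
    simp
  have hG : ∀ k, ((PySem.Dict.mk (((sellers.foldl (fun d p => d.modify p.1 [] (fun h => h ++ [p.2])) PySem.Dict.empty).items).map (fun kv => (kv.1, PySem.List.sorted kv.2 (fun x => x) false)))).get? k)
      = ((sellers.foldl (fun d p => d.modify p.1 [] (fun h => h ++ [p.2])) PySem.Dict.empty).get? k).map (fun v => PySem.List.sorted v (fun x => x) false) := by
    intro k
    exact get?_mapValues _ _ k
  have hGd : ∀ k, ((PySem.Dict.mk (((sellers.foldl (fun d p => d.modify p.1 [] (fun h => h ++ [p.2])) PySem.Dict.empty).items).map (fun kv => (kv.1, PySem.List.sorted kv.2 (fun x => x) false)))).getD k [] : List Int)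
      = PySem.List.sorted (((sellers.foldl (fun d p => d.modify p.1 [] (fun h => h ++ [p.2])) PySem.Dict.empty).getD k [] : List Int)) (fun x => x) false := by
    intro k
    rw [PySem.Dict.getD_eq_get?_getD, hG k, PySem.Dict.getD_eq_get?_getD]
    cases (sellers.foldl (fun d p => d.modify p.1 [] (fun h => h ++ [p.2])) PySem.Dict.empty).get? k with
    | none => rfl
    | some v => rfl
  have hA0 : ∀ k, ((sellers.foldl (fun d p => d.modify p.1 [] (fun h => heapPush h p.2)) PySem.Dict.empty).getD k [] : List Int)
      = PySem.List.sorted (((sellers.filter (fun p => p.1 == k)).map (·.2))) (fun x => x) false := by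
    intro k
    rw [getD_foldl_heapPush, PySem.List.sorted_eq_foldl_insertBy]
    rfl
  have hcont : ∀ k, (sellers.foldl (fun d p => d.modify p.1 [] (fun h => heapPush h p.2)) PySem.Dict.empty).contains k
      = (PySem.Dict.mk (((sellers.foldl (fun d p => d.modify p.1 [] (fun h => h ++ [p.2])) PySem.Dict.empty).items).map (fun kv => (kv.1, PySem.List.sorted kv.2 (fun x => x) false)))).contains k := by
    intro k
    rw [PySem.Dict.contains_eq_decide_mem_keys, PySem.Dict.contains_eq_decide_mem_keys]
    congr 1
    simp only [PySem.Dict.keys, List.map_map]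
    rw [show ((fun p => p.1) ∘ (fun kv : String × List Int => (kv.1, PySem.List.sorted kv.2 (fun x => x) false))) = (fun p : String × List Int => p.1) from rfl]
    rw [show ((sellers.foldl (fun d p => d.modify p.1 [] (fun h => heapPush h p.2)) PySem.Dict.empty).items.map (fun p => p.1)) = (sellers.foldl (fun d p => d.modify p.1 [] (fun h => heapPush h p.2)) PySem.Dict.empty).keys from rfl]
    rw [show ((sellers.foldl (fun d p => d.modify p.1 [] (fun h => h ++ [p.2])) PySem.Dict.empty).items.map (fun p => p.1)) = (sellers.foldl (fun d p => d.modify p.1 [] (fun h => h ++ [p.2])) PySem.Dict.empty).keys from rfl]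
    rw [PySem.Dict.keys_foldl_modify_key, PySem.Dict.keys_foldl_modify_key]
  constructor
  · intro k
    rw [hGd k]
    simpa using PySem.List.sorted_pairwise ((sellers.foldl (fun d p => d.modify p.1 [] (fun h => h ++ [p.2])) PySem.Dict.empty).getD k []) (fun x => x)
  · intro k
    refine ⟨hcont k, by simp [PySem.Dict.getD_empty], ?_⟩
    rw [hGd k, hF k, hA0 k]
    simp [PySem.Dict.getD_empty]

-- ===== VERDICT (by name: the statement is the Claim_ definition above) =====
theorem match_requests_spec : Claim_equal_match_requests := by
  intro requests sellers _
  unfold Spec_match_requests match_requests match_requests_alt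
  obtain ⟨hs, hI⟩ := init_inv sellers
  exact fold_eq hs requests _ _ [] hI
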